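-- pv_equiv track=rewrite | github.com/sarakadam29/PawsConnect | backend/app/services/emergency_engine.py | _level_from_score
-- ===== SOURCE A (Python) =====
-- def _level_from_score(score: int | None, findings: list[str]) -> str:
--     joined = " ".join(findings).lower()
--     if score is not None and score < 30:
--         return "emergency"
--     if any(term in joined for term in ("bleeding", "fracture", "exposed tissue", "collapse", "pale", "broken limb", "broken bone", "weakness", "unable to stand")):
--         return "emergency"
--     if score is not None and score < 50:
--         return "urgent"
--     if any(term in joined for term in ("limping", "swelling", "bruise", "weakness", "dragging limb", "eye irritation")):
--         return "vet_soon"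
--     return "monitor"
-- ===== SOURCE B (Python) =====
-- _TERM_SEVERITY = {
--     "bleeding": 3, "fracture": 3, "exposed tissue": 3, "collapse": 3,
--     "pale": 3, "broken limb": 3, "broken bone": 3, "weakness": 3,
--     "unable to stand": 3,
--     "limping": 1, "swelling": 1, "bruise": 1, "dragging limb": 1,
--     "eye irritation": 1,
-- }
-- _LEVELS = {0: "monitor", 1: "vet_soon", 2: "urgent", 3: "emergency"}
--
-- def _level_from_score(score, findings):
--     joined = " ".join(findings).lower()
--     if score is None:
--         sev = 0
--     elif score < 30:
--         sev = 3
--     elif score < 50: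
--         sev = 2
--     else:
--         sev = 0
--     for term, weight in _TERM_SEVERITY.items():
--         if term in joined and weight > sev:
--             sev = weight
--     return _LEVELS.get(sev, "monitor")
-- ===== Notes on version B (the rewrite author's own statement) =====
-- stated objective: alternative
-- what changed: Replaces A's short-circuit if-cascade with a numeric severity computation: a score-derived base severity is raised by a single max-accumulating pass over one weighted term table (emergency terms weight 3, vet_soon terms weight 1), and the final number is mapped to its level name.
import Mathlib
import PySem

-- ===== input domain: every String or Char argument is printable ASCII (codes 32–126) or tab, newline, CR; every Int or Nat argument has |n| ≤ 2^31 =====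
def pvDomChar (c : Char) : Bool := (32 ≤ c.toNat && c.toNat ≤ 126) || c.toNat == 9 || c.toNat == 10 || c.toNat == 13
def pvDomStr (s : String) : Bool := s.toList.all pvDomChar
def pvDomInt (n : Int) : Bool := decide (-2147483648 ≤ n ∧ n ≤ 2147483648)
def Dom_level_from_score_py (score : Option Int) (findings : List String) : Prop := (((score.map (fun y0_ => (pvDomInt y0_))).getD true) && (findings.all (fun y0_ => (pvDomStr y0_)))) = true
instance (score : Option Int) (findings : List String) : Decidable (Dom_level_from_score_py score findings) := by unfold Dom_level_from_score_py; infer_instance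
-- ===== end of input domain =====

-- B replaces A's short-circuit if-cascade with a numeric max-severity accumulation over one weighted term table; same results, no speed claim.
-- ===== PORT A =====
def pvEmergencyTerms : List String := ["bleeding", "fracture", "exposed tissue", "collapse", "pale", "broken limb", "broken bone", "weakness", "unable to stand"]
def pvVetSoonTerms : List String := ["limping", "swelling", "bruise", "weakness", "dragging limb", "eye irritation"]

def level_from_score_py (score : Option Int) (findings : List String) : String :=
  let joined := PySem.Str.lower (PySem.Str.join " " findings)
  if score.elim false (fun s => decide (s < 30)) then "emergency"
  else if pvEmergencyTerms.any (fun t => PySem.Str.isIn t joined) then "emergency"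
  else if score.elim false (fun s => decide (s < 50)) then "urgent"
  else if pvVetSoonTerms.any (fun t => PySem.Str.isIn t joined) then "vet_soon"
  else "monitor"

-- ===== PORT B =====
def pvTermSeverity : List (String × Int) :=
  [("bleeding", 3), ("fracture", 3), ("exposed tissue", 3), ("collapse", 3),
   ("pale", 3), ("broken limb", 3), ("broken bone", 3), ("weakness", 3),
   ("unable to stand", 3),
   ("limping", 1), ("swelling", 1), ("bruise", 1), ("dragging limb", 1),
   ("eye irritation", 1)]

def pvLevels : PySem.Dict Int String :=
  PySem.Dict.ofList [(0, "monitor"), (1, "vet_soon"), (2, "urgent"), (3, "emergency")]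

def level_from_score_py_alt (score : Option Int) (findings : List String) : String :=
  let joined := PySem.Str.lower (PySem.Str.join " " findings)
  let sev0 : Int :=
    match score with
    | none => 0
    | some s => if s < 30 then 3 else if s < 50 then 2 else 0
  let sev := pvTermSeverity.foldl
    (fun sev tw => if PySem.Str.isIn tw.1 joined && decide (tw.2 > sev) then tw.2 else sev) sev0
  PySem.Dict.getD pvLevels sev "monitor"

-- ===== PRECONDITION & SPEC =====
def Spec_level_from_score_py (score : Option Int) (findings : List String) (out : String) : Prop := out = level_from_score_py_alt score findings
instance (score : Option Int) (findings : List String) (out : String) : Decidable (Spec_level_from_score_py score findings out) := by unfold Spec_level_from_score_py; infer_instance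

-- ===== CLAIM =====
def Claim_equal_level_from_score_py : Prop := ∀ (score : Option Int) (findings : List String), Dom_level_from_score_py score findings → Spec_level_from_score_py score findings (level_from_score_py score findings)

-- ===== LEMMAS AND PROOFS =====

-- vet_soon terms without "weakness" (which carries emergency weight in the table)
def pvVet5 : List String := ["limping", "swelling", "bruise", "dragging limb", "eye irritation"]

lemma pvTermSeverity_split :
    pvTermSeverity = pvEmergencyTerms.map (fun t => (t, (3 : Int))) ++ pvVet5.map (fun t => (t, (1 : Int))) := rfl

lemma fold_const (joined : String) (w : Int) (l : List String) (init : Int) :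
    (l.map (fun t => (t, w))).foldl
      (fun sev tw => if PySem.Str.isIn tw.1 joined && decide (tw.2 > sev) then tw.2 else sev) init
    = if l.any (fun t => PySem.Str.isIn t joined) then max init w else init := by
  induction l generalizing init with
  | nil => simp
  | cons t l ih =>
    simp only [List.map, List.foldl, List.any_cons]
    by_cases h : PySem.Str.isIn t joined = true
    · have hstep : (if PySem.Str.isIn t joined && decide (w > init) then w else init) = max init w := by
        rw [h, Bool.true_and]
        by_cases hgt : w > init
        · rw [if_pos (by simpa using hgt)]
          exact (max_eq_right (le_of_lt hgt)).symm
        · rw [if_neg (by simpa using hgt)]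
          exact (max_eq_left (not_lt.mp hgt)).symm
      rw [hstep, ih]
      simp only [h, Bool.true_or, if_pos]
      by_cases hl : l.any (fun t => PySem.Str.isIn t joined) = true
      · rw [if_pos hl, max_assoc, max_self]
      · rw [if_neg hl]
    · rw [Bool.not_eq_true] at h
      simp only [h, Bool.false_and, Bool.false_or]
      rw [if_neg (by decide)]
      exact ih init

lemma vet_any_of_no_emergency (joined : String)
    (h : pvEmergencyTerms.any (fun t => PySem.Str.isIn t joined) = false) :
    pvVetSoonTerms.any (fun t => PySem.Str.isIn t joined)
      = pvVet5.any (fun t => PySem.Str.isIn t joined) := by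
  have hw : PySem.Str.isIn "weakness" joined = false := by
    simp only [pvEmergencyTerms, List.any_cons, List.any_nil, Bool.or_eq_false_iff] at h
    exact h.2.2.2.2.2.2.2.1
  simp only [pvVetSoonTerms, pvVet5, List.any_cons, List.any_nil, hw, Bool.false_or,
    Bool.or_false]

-- ===== VERDICT =====
theorem level_from_score_py_spec : Claim_equal_level_from_score_py := by
  intro score findings _
  unfold Spec_level_from_score_py
  simp only [level_from_score_py, level_from_score_py_alt, pvTermSeverity_split,
    List.foldl_append, fold_const]
  set joined := PySem.Str.lower (PySem.Str.join " " findings) with hj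
  cases hE : pvEmergencyTerms.any (fun t => PySem.Str.isIn t joined) with
  | true =>
    cases hV : pvVet5.any (fun t => PySem.Str.isIn t joined) <;>
    · cases score with
      | none => simp; decide
      | some s =>
        by_cases h30 : s < 30 <;> by_cases h50 : s < 50 <;>
          simp [h30, h50] <;> decide
  | false =>
    rw [vet_any_of_no_emergency joined hE]
    cases hV : pvVet5.any (fun t => PySem.Str.isIn t joined) <;>
    · cases score with
      | none => simp; decide
      | some s =>
        by_cases h30 : s < 30 <;> by_cases h50 : s < 50 <;>
          simp [h30, h50] <;> decide
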